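-- pv_equiv track=rewrite | github.com/DanvdBoo/Advent-Of-Code | 2023/14.py | part2
-- ===== SOURCE A (Python) =====
-- def part2(s: str):
--     result = 0
--     grid = [[char for char in line] for line in s.splitlines()]
--     grids = [''.join(char for line in grid for char in line)]
--     cycle = 0
--     while cycle < 1000000000:
--         for _ in range(4):
--             for iRow, row in enumerate(grid):
--                 for iCol, char in enumerate(row):
--                     if char == 'O':
--                         i = iRow
--                         while i != 0:
--                             if grid[i - 1][iCol] == '.':
--                                 i -= 1
--                             else:
--                                 break
--                         grid[iRow][iCol] = '.'
--                         grid[i][iCol] = 'O'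
--             grid = [list(elem) for elem in list(zip(*grid[::-1]))]
--         stringifyGrid = ''.join(char for line in grid for char in line)
--         if stringifyGrid in grids:
--             finalGrid = [[char for char in line] for line in list(map(''.join, zip(*[iter(grids[(1000000000 - grids.index(stringifyGrid)) % (len(grids) - grids.index(stringifyGrid)) + grids.index(stringifyGrid)])]*len(grid[0]))))]
--             for iRow, row in enumerate(finalGrid):
--                 for char in row:
--                     if char == 'O':
--                         result += len(finalGrid) - iRow
--             break
--         grids.append(stringifyGrid)
--         cycle += 1
--     return result
-- ===== SOURCE B (Python) =====
-- def part2(s: str):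
--     grid = [list(r) for r in s.splitlines()]
--
--     def settle(col):
--         out = []
--         for r, ch in enumerate(col):
--             if ch == 'O':
--                 out.append('O')
--             elif ch != '.':
--                 out += ['.'] * (r - len(out))
--                 out.append(ch)
--         out += ['.'] * (len(col) - len(out))
--         return out
--
--     def tilt_north(g):
--         h = len(g)
--         cols = [[g[r][c] for r in range(h)] for c in range(len(g[0]))]
--         new_cols = [settle(col) for col in cols]
--         return [[new_cols[c][r] for c in range(len(new_cols))] for r in range(h)]
--
--     def rotate_cw(g):
--         h, w = len(g), len(g[0])
--         return [[g[h - 1 - j][i] for j in range(h)] for i in range(w)]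
--
--     def spin(g):
--         for _ in range(4):
--             g = rotate_cw(tilt_north(g))
--         return g
--
--     seen = {}
--     history = []
--     state = ''.join(''.join(row) for row in grid)
--     for cycle in range(1000000000):
--         seen[state] = cycle
--         history.append(state)
--         grid = spin(grid)
--         state = ''.join(''.join(row) for row in grid)
--         if state in seen:
--             idx = seen[state]
--             target = idx + (1000000000 - idx) % (cycle + 1 - idx)
--             final = history[target]
--             h, w = len(grid), len(grid[0])
--             return sum(h - i // w for i, ch in enumerate(final) if ch == 'O')
--     return 0
-- ===== Notes on version B (the rewrite author's own statement) =====
-- stated objective: alternative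
-- what changed: B replaces A's per-rock upward-walk tilt (row-major in-place mutation with an inner while loop per rock) by a single free-slot pass per column that rebuilds each column functionally, replaces A's linear membership-and-index scans over the list of stored states with a dict mapping state to cycle index plus a history list, and sums the final load directly over the flat state string with floor division by the width instead of re-chunking it into rows.
-- outside the precondition, e.g. on part2('O.\nO'): A returns 3, B raises IndexError; on part2('..\n.'): A returns 0, B raises IndexError; on part2('..\n.#.'): A returns 0, B returns 0
import Mathlib
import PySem

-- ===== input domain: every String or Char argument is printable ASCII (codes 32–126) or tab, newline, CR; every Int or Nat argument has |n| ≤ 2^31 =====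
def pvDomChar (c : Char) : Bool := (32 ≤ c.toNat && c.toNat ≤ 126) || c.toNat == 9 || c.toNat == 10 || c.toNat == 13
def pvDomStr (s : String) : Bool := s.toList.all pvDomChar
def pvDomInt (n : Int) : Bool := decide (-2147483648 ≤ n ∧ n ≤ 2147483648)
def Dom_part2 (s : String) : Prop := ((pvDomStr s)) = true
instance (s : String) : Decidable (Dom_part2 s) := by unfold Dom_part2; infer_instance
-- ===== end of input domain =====

-- B removes A's per-rock upward walk (one settle pass per column), detects repeats with a
-- dict instead of list membership + .index scans, and sums the load from the flat state
-- with i // w instead of re-chunking into rows; equal return value on Pre_ (A also mutates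
-- nothing observable: its grid is freshly built from s).

-- ===== PORT A =====
-- grid cell read g[r][c] / write; indices are always in range on Pre_ inputs (rectangular
-- grid, shape preserved by every pass), where getD/set are exact Python indexing.
def pvGet2 (g : List (List Char)) (r c : Nat) : Char := (g.getD r []).getD c ' '

def pvSet2 (g : List (List Char)) (r c : Nat) (ch : Char) : List (List Char) :=
  g.set r ((g.getD r []).set c ch)

-- A's inner `while i != 0: if grid[i-1][iCol] == '.': i -= 1 else: break`
def pvRollA (g : List (List Char)) (c : Nat) : Nat → Nat
  | 0 => 0
  | i + 1 => if pvGet2 g i c = '.' then pvRollA g c i else i + 1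

-- A's in-place north tilt: row-major scan (enumerate over the live list: reads at (r,c)
-- see the original value, reads above see settled rocks — exactly this threaded fold).
def pvTiltStepA (g : List (List Char)) (r c : Nat) : List (List Char) :=
  if pvGet2 g r c = 'O' then
    pvSet2 (pvSet2 g r c '.') (pvRollA g c r) c 'O'
  else g

def pvTiltA (g : List (List Char)) : List (List Char) :=
  (List.range g.length).foldl
    (fun g1 r => (List.range (g1.getD r []).length).foldl (fun g2 c => pvTiltStepA g2 r c) g1) g

-- min of the row lengths: what zip(*rows) truncates to (zip() of no rows is empty)
def pvMinLen : List (List Char) → Nat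
  | [] => 0
  | x :: xs => xs.foldl (fun m row => min m row.length) x.length

-- grid = [list(elem) for elem in zip(*grid[::-1])]
def pvRotA (g : List (List Char)) : List (List Char) :=
  let rg := g.reverse
  (List.range (pvMinLen rg)).map (fun j => rg.map (fun row => row.getD j ' '))

def pvSpinA (g : List (List Char)) : List (List Char) :=
  (List.range 4).foldl (fun g' _ => pvRotA (pvTiltA g')) g

-- zip(*[iter(x)]*w): groups of w, an incomplete last group is dropped
def pvChunks (w : Nat) (l : List Char) : List (List Char) :=
  if h : w = 0 ∨ l.length < w then []
  else l.take w :: pvChunks w (l.drop w)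
termination_by l.length
decreasing_by push Not at h; simp only [List.length_drop]; omega

def pvLoadA (fg : List (List Char)) : Int :=
  (PySem.List.enumerate fg 0).foldl
    (fun res p => p.2.foldl (fun r2 ch => if ch = 'O' then r2 + ((fg.length : Int) - p.1) else r2) res) 0

-- A's while loop; fuel = remaining iterations of `while cycle < 1000000000` (returns the
-- still-0 result if it ever ran out, exactly as A's loop would).
-- `if sg in grids: … grids.index(sg)` is the match on index? (first occurrence).
def pvLoopA : Nat → List (List Char) → List (List Char) → Int
  | 0, _, _ => 0
  | fuel + 1, grid, grids =>
    let grid' := pvSpinA grid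
    let sg := grid'.flatten
    match PySem.List.index? grids sg with
    | some idx =>
      let target := (1000000000 - idx) % (grids.length - idx) + idx
      pvLoadA (pvChunks (grid'.headD []).length (grids.getD target []))
    | none => pvLoopA fuel grid' (grids ++ [sg])

def part2 (s : String) : Int :=
  let grid := (PySem.Str.splitlines s).map String.toList
  pvLoopA 1000000000 grid [grid.flatten]

-- ===== PORT B =====
-- settle(col): one pass, rocks append at the free slot (= current length), a blocker pads
-- with dots to its own row and resets the free slot below itself.
def pvSettleStep (out : List Char) (p : Int × Char) : List Char :=
  if p.2 = 'O' then out ++ ['O']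
  else if p.2 ≠ '.' then out ++ List.replicate (p.1 - (out.length : Int)).toNat '.' ++ [p.2]
  else out

def pvSettle (col : List Char) : List Char :=
  let out := (PySem.List.enumerate col 0).foldl pvSettleStep []
  out ++ List.replicate (col.length - out.length) '.'

def pvTiltB (g : List (List Char)) : List (List Char) :=
  let h := g.length
  let cols := (List.range (g.headD []).length).map (fun c => (List.range h).map (fun r => pvGet2 g r c))
  let ncols := cols.map pvSettle
  (List.range h).map (fun r => (List.range ncols.length).map (fun c => (ncols.getD c []).getD r ' '))

def pvRotB (g : List (List Char)) : List (List Char) :=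
  let h := g.length
  let w := (g.headD []).length
  (List.range w).map (fun i => (List.range h).map (fun j => pvGet2 g (h - 1 - j) i))

def pvSpinB (g : List (List Char)) : List (List Char) :=
  (List.range 4).foldl (fun g' _ => pvRotB (pvTiltB g')) g

-- sum(h - i // w for i, ch in enumerate(final) if ch == 'O')
def pvLoadB (final : List Char) (h w : Nat) : Int :=
  (PySem.List.enumerate final 0).foldl
    (fun acc p => if p.2 = 'O' then acc + ((h : Int) - p.1 / (w : Int)) else acc) 0

-- B's `for cycle in range(10**9)` loop (returns 0 if it ever finished without a repeat)
def pvLoopB : Nat → Nat → List (List Char) → List Char →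
    PySem.Dict (List Char) Nat → List (List Char) → Int
  | 0, _, _, _, _, _ => 0
  | fuel + 1, cycle, grid, state, seen, history =>
    let seen' := seen.insert state cycle
    let history' := history ++ [state]
    let grid' := pvSpinB grid
    let state' := grid'.flatten
    match seen'.get? state' with
    | some idx =>
      let target := idx + (1000000000 - idx) % (cycle + 1 - idx)
      pvLoadB (history'.getD target []) grid'.length (grid'.headD []).length
    | none => pvLoopB fuel (cycle + 1) grid' state' seen' history'

def part2_alt (s : String) : Int :=
  let grid := (PySem.Str.splitlines s).map String.toList
  pvLoopB 1000000000 0 grid grid.flatten PySem.Dict.empty []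

-- ===== PRECONDITION & SPEC =====
-- Pre_ excludes the empty grid and zero-width or ragged (unequal line length) grids: there A
-- either raises IndexError or returns a value shaped by zip(*…) silently truncating rows —
-- an accident of the rotation trick that B (which indexes every row at every column) cannot
-- and should not reproduce.
def Pre_part2 (s : String) : Prop :=
  let g := (PySem.Str.splitlines s).map String.toList
  g ≠ [] ∧ (g.headD []).length ≠ 0 ∧ ∀ row ∈ g, row.length = (g.headD []).length

instance (s : String) : Decidable (Pre_part2 s) := by unfold Pre_part2; infer_instance

def pvWitness_part2 : String := "O.\n##"

def Spec_part2 (s : String) (out : Int) : Prop := out = part2_alt s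
instance (s : String) (out : Int) : Decidable (Spec_part2 s out) := by unfold Spec_part2; infer_instance

-- ===== CLAIM (what is proved, stated in full; the proofs are below) =====
def Claim_equal_part2 : Prop := ∀ (s : String), Dom_part2 s → Pre_part2 s → Spec_part2 s (part2 s)

-- ===== LEMMAS AND PROOFS =====


-- column view of the grid, and the shape invariant
def pvCol (g : List (List Char)) (c : Nat) : List Char := g.map (fun row => row.getD c ' ')

def pvRect (h w : Nat) (g : List (List Char)) : Prop :=
  g.length = h ∧ ∀ row ∈ g, row.length = w

def pvRollCol (col : List Char) : Nat → Nat
  | 0 => 0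
  | i + 1 => if col.getD i ' ' = '.' then pvRollCol col i else i + 1

def pvColStep (col : List Char) (r : Nat) : List Char :=
  if col.getD r ' ' = 'O' then (col.set r '.').set (pvRollCol col r) 'O' else col

theorem pvGet2_col (g : List (List Char)) (r c : Nat) :
    pvGet2 g r c = (pvCol g c).getD r ' ' := by
  simp [pvGet2, pvCol, List.getD_eq_getElem?_getD]
  cases g[r]? <;> simp [List.getD_eq_getElem?_getD]

theorem pvRollA_col (g : List (List Char)) (c : Nat) (i : Nat) :
    pvRollA g c i = pvRollCol (pvCol g c) i := by
  induction i with
  | zero => rfl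
  | succ i ih => simp [pvRollA, pvRollCol, pvGet2_col, ih]

theorem pvRect_pvSet2 {h w : Nat} {g : List (List Char)} (hg : pvRect h w g)
    (r c : Nat) (ch : Char) : pvRect h w (pvSet2 g r c ch) := by
  obtain ⟨h1, h2⟩ := hg
  refine ⟨by simp [pvSet2, h1], ?_⟩
  intro row hrow
  by_cases hr : r < g.length
  · rcases List.mem_or_eq_of_mem_set hrow with hmem | rfl
    · exact h2 _ hmem
    · rw [List.length_set, List.getD_eq_getElem g [] hr]
      exact h2 _ (List.getElem_mem hr)
  · rw [pvSet2, List.set_eq_of_length_le (by omega)] at hrow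
    exact h2 _ hrow

theorem pvGetD_set_ne {l : List Char} {i j : Nat} (hne : j ≠ i) (a d : Char) :
    (l.set i a).getD j d = l.getD j d := by
  simp [List.getD_eq_getElem?_getD, List.getElem?_set, Ne.symm hne]

theorem pvCol_set_ne {c' c : Nat} (hne : c' ≠ c) (g : List (List Char)) (r : Nat) (ch : Char) :
    pvCol (pvSet2 g r c ch) c' = pvCol g c' := by
  unfold pvCol pvSet2
  rw [List.map_set]
  by_cases hr : r < g.length
  · rw [List.getD_eq_getElem g [] hr, pvGetD_set_ne hne]
    have hmap : r < (g.map (fun row => row.getD c' ' ')).length := by simpa using hr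
    have : (g[r]).getD c' ' ' = (g.map (fun row => row.getD c' ' '))[r]'hmap := by simp
    rw [this, List.set_getElem_self]
  · exact List.set_eq_of_length_le (by simpa using Nat.le_of_not_lt hr)

theorem pvCol_set_self {h w : Nat} {g : List (List Char)} (hg : pvRect h w g) {c : Nat}
    (hc : c < w) (r : Nat) (ch : Char) :
    pvCol (pvSet2 g r c ch) c = (pvCol g c).set r ch := by
  obtain ⟨h1, h2⟩ := hg
  unfold pvCol pvSet2
  rw [List.map_set]
  by_cases hr : r < g.length
  · have hlen : (g.getD r []).length = w := by
      rw [List.getD_eq_getElem g [] hr]; exact h2 _ (List.getElem_mem hr)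
    have : ((g.getD r []).set c ch).getD c ' ' = ch := by
      rw [List.getD_eq_getElem?_getD, List.getElem?_set, if_pos rfl, if_pos (by omega)]
      rfl
    rw [this]
  · rw [List.set_eq_of_length_le (by simpa using Nat.le_of_not_lt hr),
        List.set_eq_of_length_le (by simpa using Nat.le_of_not_lt hr)]

theorem pvRect_step {h w : Nat} {g : List (List Char)} (hg : pvRect h w g) (r c : Nat) :
    pvRect h w (pvTiltStepA g r c) := by
  unfold pvTiltStepA
  split
  · exact pvRect_pvSet2 (pvRect_pvSet2 hg _ _ _) _ _ _
  · exact hg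

theorem pvStep_col {h w : Nat} {g : List (List Char)} (hg : pvRect h w g) {c : Nat}
    (hc : c < w) (r : Nat) (c' : Nat) :
    pvCol (pvTiltStepA g r c) c' =
      if c' = c then pvColStep (pvCol g c) r else pvCol g c' := by
  unfold pvTiltStepA pvColStep
  by_cases hO : pvGet2 g r c = 'O'
  · rw [if_pos hO]
    by_cases hc' : c' = c
    · subst hc'
      rw [pvCol_set_self (pvRect_pvSet2 hg _ _ _) hc, pvCol_set_self hg hc, if_pos rfl,
          pvRollA_col, if_pos (by rw [← pvGet2_col]; exact hO)]
    · rw [pvCol_set_ne hc', pvCol_set_ne hc', if_neg hc']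
  · rw [if_neg hO]
    by_cases hc' : c' = c
    · subst hc'
      rw [if_pos rfl, if_neg (by rw [← pvGet2_col]; exact hO)]
    · rw [if_neg hc']

theorem pvInnerFold_col {h w : Nat} (r : Nat) (cs : List Nat) (hnd : cs.Nodup)
    (hcs : ∀ c ∈ cs, c < w) :
    ∀ (g : List (List Char)), pvRect h w g → ∀ c',
      pvCol (cs.foldl (fun g2 c => pvTiltStepA g2 r c) g) c' =
        if c' ∈ cs then pvColStep (pvCol g c') r else pvCol g c' := by
  induction cs with
  | nil => intro g _ c'; simp
  | cons c cs ih =>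
    intro g hg c'
    simp only [List.foldl_cons]
    have hnd' := hnd.of_cons
    have hcnotin : c ∉ cs := (List.nodup_cons.mp hnd).1
    have hcol := pvStep_col hg (hcs c List.mem_cons_self) r
    rw [ih hnd' (fun x hx => hcs x (List.mem_cons_of_mem _ hx)) _
          (pvRect_step hg r c) c']
    by_cases h1 : c' ∈ cs
    · have hne : c' ≠ c := fun hh => hcnotin (hh ▸ h1)
      rw [if_pos h1, if_pos (List.mem_cons_of_mem _ h1), hcol c', if_neg hne]
    · rw [if_neg h1, hcol c']
      by_cases h2 : c' = c
      · subst h2; simp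
      · simp [h1, h2]

theorem pvRect_innerFold {h w : Nat} (cs : List Nat) (g : List (List Char))
    (hg : pvRect h w g) (r : Nat) :
    pvRect h w (cs.foldl (fun g2 c => pvTiltStepA g2 r c) g) := by
  induction cs generalizing g with
  | nil => exact hg
  | cons c cs ih => exact ih _ (pvRect_step hg _ _)

theorem pvTiltA_col {h w : Nat} {g : List (List Char)} (hg : pvRect h w g) :
    (pvRect h w (pvTiltA g)) ∧ ∀ c < w,
      pvCol (pvTiltA g) c = (List.range h).foldl pvColStep (pvCol g c) := by
  have main : ∀ (rs : List Nat), (∀ r ∈ rs, r < h) → ∀ g, pvRect h w g →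
      pvRect h w (rs.foldl (fun g1 r =>
          (List.range (g1.getD r []).length).foldl (fun g2 c => pvTiltStepA g2 r c) g1) g) ∧
      ∀ c < w, pvCol (rs.foldl (fun g1 r =>
          (List.range (g1.getD r []).length).foldl (fun g2 c => pvTiltStepA g2 r c) g1) g) c =
        rs.foldl pvColStep (pvCol g c) := by
    intro rs
    induction rs with
    | nil => intro _ g hg; exact ⟨hg, fun _ _ => rfl⟩
    | cons r rs ih =>
      intro hmem g hg
      simp only [List.foldl_cons]
      have hr : r < h := hmem r List.mem_cons_self
      have hlen : (g.getD r []).length = w := by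
        rw [List.getD_eq_getElem g [] (hg.1 ▸ hr)]
        exact hg.2 _ (List.getElem_mem _)
      rw [hlen]
      have hg' : pvRect h w ((List.range w).foldl (fun g2 c => pvTiltStepA g2 r c) g) :=
        pvRect_innerFold _ _ hg r
      have hcols := pvInnerFold_col (h := h) r (List.range w) (List.nodup_range)
        (fun c hc => List.mem_range.mp hc) g hg
      obtain ⟨ha, hb⟩ := ih (fun x hx => hmem x (List.mem_cons_of_mem _ hx)) _ hg'
      refine ⟨ha, fun c hc => ?_⟩
      rw [hb c hc, hcols c, if_pos (List.mem_range.mpr hc)]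
  have h1 := hg.1
  constructor
  · have := (main (List.range h) (fun r hr => List.mem_range.mp hr) g hg).1
    unfold pvTiltA; rw [h1]; exact this
  · intro c hc
    have := (main (List.range h) (fun r hr => List.mem_range.mp hr) g hg).2 c hc
    unfold pvTiltA; rw [h1]; exact this

theorem pvSet_append_len (l1 l2 : List Char) (x y : Char) :
    (l1 ++ x :: l2).set l1.length y = l1 ++ y :: l2 := by
  induction l1 with
  | nil => rfl
  | cons a t ih => simp [ih]

theorem pvGetD_append_left (l1 l2 : List Char) (j : Nat) (hj : j < l1.length) (d : Char) :
    (l1 ++ l2).getD j d = l1.getD j d := by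
  simp [List.getD_eq_getElem?_getD, List.getElem?_append_left hj]

theorem pvGetD_append_right (l1 l2 : List Char) (j : Nat) (hj : l1.length ≤ j) (d : Char) :
    (l1 ++ l2).getD j d = l2.getD (j - l1.length) d := by
  simp [List.getD_eq_getElem?_getD, List.getElem?_append_right hj]

theorem pvRollCol_spec (S : List Char) (f : Nat) :
    ∀ (k : Nat), f ≤ k →
    (∀ j, f ≤ j → j < k → S.getD j ' ' = '.') →
    (f = 0 ∨ S.getD (f - 1) ' ' ≠ '.') →
    pvRollCol S k = f := by
  intro k
  induction k with
  | zero =>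
    intro hf _ _
    have : f = 0 := by omega
    subst this
    rfl
  | succ j ih =>
    intro hf hdots hstop
    by_cases hj : f = j + 1
    · subst hj
      have hnd : S.getD j ' ' ≠ '.' := by
        rcases hstop with h | h
        · exact absurd h (by omega)
        · simpa using h
      have hstep : pvRollCol S (j + 1) = if S.getD j ' ' = '.' then pvRollCol S j else j + 1 :=
        rfl
      rw [hstep, if_neg hnd]
    · have hfj : f ≤ j := by omega
      have hd : S.getD j ' ' = '.' := hdots j hfj (by omega)
      simp only [pvRollCol, hd, if_pos rfl]
      exact ih hfj (fun x hx1 hx2 => hdots x hx1 (by omega)) hstop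

theorem pvRepCons (m : Nat) (a : Char) (t : List Char) :
    List.replicate m a ++ a :: t = a :: (List.replicate m a ++ t) := by
  induction m with
  | zero => simp
  | succ m ih => simp [List.replicate_succ, ih]

theorem pvRockSet (out rest : List Char) (i j m : Nat) (x : Char)
    (hi : i = out.length + m) (hj : j = out.length) :
    (((out ++ List.replicate m '.') ++ x :: rest).set i '.').set j 'O'
      = (out ++ ['O']) ++ (List.replicate m '.' ++ rest) := by
  subst hi hj
  have h1 : ((out ++ List.replicate m '.') ++ x :: rest).set (out.length + m) '.'
      = (out ++ List.replicate m '.') ++ '.' :: rest := by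
    have h2 := pvSet_append_len (out ++ List.replicate m '.') rest x '.'
    simpa using h2
  rw [h1, List.append_assoc, pvRepCons, pvSet_append_len]
  simp

def pvOut (col : List Char) (k : Nat) : List Char :=
  (PySem.List.enumerate (col.take k) 0).foldl pvSettleStep []

theorem pvOut_succ (col : List Char) (k : Nat) (hk : k < col.length) :
    pvOut col (k + 1) = pvSettleStep (pvOut col k) ((k : Int), col[k]) := by
  unfold pvOut
  have htake : col.take (k + 1) = col.take k ++ [col[k]] := by
    rw [List.take_succ, List.getElem?_eq_getElem hk]
    rfl
  rw [htake, PySem.List.enumerate_append, List.foldl_append]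
  simp [PySem.List.enumerate_cons, PySem.List.enumerate_nil,
    Nat.min_eq_left (Nat.le_of_lt hk)]

theorem pvSettle_inv (col : List Char) :
    ∀ (k : Nat), k ≤ col.length →
    ((List.range k).foldl pvColStep col =
      (pvOut col k ++ List.replicate (k - (pvOut col k).length) '.') ++ col.drop k)
    ∧ (pvOut col k).length ≤ k ∧ (pvOut col k).getLast? ≠ some '.' := by
  intro k
  induction k with
  | zero => intro _; refine ⟨by simp [pvOut], by simp [pvOut], by simp [pvOut]⟩
  | succ k ih =>
    intro hk1
    have hkl : k < col.length := by omega
    obtain ⟨hS, hf, hlast⟩ := ih (by omega)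
    have hrec := pvOut_succ col k hkl
    have hl1 : (pvOut col k ++ List.replicate (k - (pvOut col k).length) '.').length = k := by
      simp <;> omega
    have hdropk : col.drop k = col[k] :: col.drop (k + 1) := List.drop_eq_getElem_cons hkl
    have hSk : ((List.range k).foldl pvColStep col).getD k ' ' = col[k] := by
      rw [hS, hdropk, pvGetD_append_right _ _ k (le_of_eq hl1), hl1]
      simp [List.getElem?_eq_getElem hkl]
    rw [List.range_succ, List.foldl_append, List.foldl_cons, List.foldl_nil]
    by_cases hO : col[k] = 'O'
    · -- a rock: it lands at the free slot, which is (pvOut col k).length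
      have hroll : pvRollCol ((List.range k).foldl pvColStep col) k = (pvOut col k).length := by
        apply pvRollCol_spec _ _ _ hf
        · intro j hj1 hj2
          rw [hS, pvGetD_append_left _ _ j (by rw [hl1]; exact hj2),
              pvGetD_append_right _ _ j hj1, List.getD_eq_getElem?_getD,
              List.getElem?_replicate, if_pos (by omega)]
          rfl
        · rcases Nat.eq_zero_or_pos (pvOut col k).length with hz | hpos
          · exact Or.inl hz
          · right
            rw [hS, pvGetD_append_left _ _ _ (by rw [hl1]; omega),
                pvGetD_append_left _ _ _ (by omega)]
            intro hcon
            apply hlast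
            rw [List.getLast?_eq_getElem?, List.getElem?_eq_getElem (by omega)]
            rw [List.getD_eq_getElem _ _ (by omega)] at hcon
            exact congrArg some hcon
      have hrec' : pvOut col (k + 1) = pvOut col k ++ ['O'] := by
        rw [hrec]; simp [pvSettleStep, hO]
      rw [pvColStep, hSk, if_pos hO, hroll, hrec', hS, hdropk]
      refine ⟨?_, by simp <;> omega, by simp⟩
      rw [pvRockSet _ _ k (pvOut col k).length (k - (pvOut col k).length) col[k]
            (by omega) rfl]
      rw [show k + 1 - (pvOut col k ++ ['O']).length = k - (pvOut col k).length from by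
            simp <;> omega]
      simp [List.append_assoc]
    · rw [pvColStep, hSk, if_neg hO]
      by_cases hdot : col[k] = '.'
      · -- a dot: both sides keep everything in place
        have hrec' : pvOut col (k + 1) = pvOut col k := by
          rw [hrec]; simp [pvSettleStep, hO, hdot]
        rw [hrec', hS, hdropk]
        refine ⟨?_, by omega, hlast⟩
        rw [show k + 1 - (pvOut col k).length = (k - (pvOut col k).length) + 1 from by omega,
            List.replicate_succ']
        simp [List.append_assoc, hdot]
      · -- a blocker: B pads with dots up to it and appends it; the free slot resets below it
        have hrec' : pvOut col (k + 1) =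
            (pvOut col k ++ List.replicate (k - (pvOut col k).length) '.') ++ [col[k]] := by
          rw [hrec]
          simp only [pvSettleStep, if_neg (by simpa using hO), if_pos (by simpa using hdot)]
          rw [show (((k : Int)) - ((pvOut col k).length : Int)).toNat =
                k - (pvOut col k).length from by omega]
        rw [hrec', hS, hdropk]
        refine ⟨?_, by simp <;> omega, by rw [List.getLast?_concat]; simpa using hdot⟩
        rw [show k + 1 - ((pvOut col k ++ List.replicate (k - (pvOut col k).length) '.')
              ++ [col[k]]).length = 0 from by simp <;> omega]
        simp [List.append_assoc]

theorem pvSettle_spec (col : List Char) :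
    (List.range col.length).foldl pvColStep col = pvSettle col ∧
    (pvSettle col).length = col.length := by
  obtain ⟨hS, hf, _⟩ := pvSettle_inv col col.length (le_refl _)
  have hout : pvOut col col.length = (PySem.List.enumerate col 0).foldl pvSettleStep [] := by
    unfold pvOut
    rw [List.take_of_length_le (le_refl _)]
  constructor
  · rw [hS, List.drop_of_length_le (le_refl _)]
    unfold pvSettle
    rw [← hout]
    simp
  · unfold pvSettle
    rw [← hout]
    simp
    omega

theorem pvColB_eq (g : List (List Char)) (c : Nat) :
    (List.range g.length).map (fun r => pvGet2 g r c) = pvCol g c := by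
  apply List.ext_getElem (by simp [pvCol])
  intro i h1 h2
  have hi : i < g.length := by simpa [pvCol] using h2
  simp [pvGet2, pvCol, List.getD_eq_getElem?_getD, List.getElem?_eq_getElem hi]

theorem pvHead_len {h w : Nat} {g : List (List Char)} (hh : 0 < h) (hg : pvRect h w g) :
    (g.headD []).length = w := by
  obtain ⟨h1, h2⟩ := hg
  cases g with
  | nil => simp at h1; omega
  | cons x xs => exact h2 x List.mem_cons_self

theorem pvTilt_eq {h w : Nat} {g : List (List Char)} (hg : pvRect h w g) :
    pvTiltA g = pvTiltB g := by
  rcases Nat.eq_zero_or_pos h with hz | hh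
  · subst hz
    have hnil : g = [] := List.eq_nil_of_length_eq_zero hg.1
    subst hnil
    rfl
  · obtain ⟨hrectA, hcols⟩ := pvTiltA_col hg
    have hwhead : (g.headD []).length = w := pvHead_len hh hg
    have hB : pvTiltB g = (List.range h).map (fun r =>
        (List.range w).map (fun c =>
          (((List.range w).map (fun c => pvSettle (pvCol g c))).getD c []).getD r ' ')) := by
      simp only [pvTiltB]
      rw [hwhead, hg.1, List.map_map]
      have hfun : (pvSettle ∘ fun c => (List.range h).map fun r => pvGet2 g r c)
          = fun c => pvSettle (pvCol g c) := by
        funext c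
        simp only [Function.comp_apply]
        rw [← hg.1, pvColB_eq]
      rw [hfun]
      simp only [List.length_map, List.length_range]
    rw [hB]
    apply List.ext_getElem (by simp [hrectA.1])
    intro r hr1 hr2
    have hrh : r < h := by simpa using hr2
    apply List.ext_getElem (by simp [hrectA.2 _ (List.getElem_mem hr1)])
    intro c hc1 hc2
    have hcw : c < w := by simpa using hc2
    have hcolL : (pvCol (pvTiltA g) c).length = h := by simp [pvCol, hrectA.1]
    have hlen2 : (pvCol g c).length = h := by simp [pvCol, hg.1]
    have hsett := pvSettle_spec (pvCol g c)
    have hcolEq : pvCol (pvTiltA g) c = pvSettle (pvCol g c) := by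
      rw [hcols c hcw, ← hlen2, hsett.1]
    have hsL : (pvSettle (pvCol g c)).length = h := by rw [hsett.2, hlen2]
    simp only [List.getElem_map, List.getElem_range]
    rw [List.getD_eq_getElem _ _
        (by simpa using hcw :
          c < ((List.range w).map (fun c => pvSettle (pvCol g c))).length)]
    simp only [List.getElem_map, List.getElem_range]
    rw [List.getD_eq_getElem _ _ (by rw [hsL]; exact hrh)]
    have hrowlen : c < (pvTiltA g)[r].length := by
      rw [hrectA.2 _ (List.getElem_mem hr1)]
      exact hcw
    have e1 : (pvTiltA g)[r][c]'hrowlen =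
        (pvCol (pvTiltA g) c)[r]'(by rw [hcolL]; exact hrh) := by
      simp only [pvCol, List.getElem_map]
      rw [List.getD_eq_getElem _ _ hrowlen]
    rw [e1]
    exact List.getElem_of_eq hcolEq _

theorem pvRect_tiltB {h w : Nat} {g : List (List Char)} (hg : pvRect h w g) :
    pvRect h w (pvTiltB g) := by
  rcases Nat.eq_zero_or_pos h with hz | hh
  · subst hz
    have hnil : g = [] := List.eq_nil_of_length_eq_zero hg.1
    subst hnil
    exact ⟨rfl, by intro row hrow; simp [pvTiltB] at hrow⟩
  · have := pvTiltA_col hg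
    rw [pvTilt_eq hg] at this
    exact this.1

theorem pvMinLen_const {w : Nat} : ∀ (l : List (List Char)), l ≠ [] →
    (∀ row ∈ l, row.length = w) → pvMinLen l = w := by
  intro l
  match l with
  | [] => intro hc _; exact absurd rfl hc
  | x :: xs =>
    intro _ hall
    have hx : x.length = w := hall _ List.mem_cons_self
    show xs.foldl (fun m row => min m row.length) x.length = w
    rw [hx]
    have aux : ∀ (ys : List (List Char)), (∀ row ∈ ys, row.length = w) →
        ys.foldl (fun m row => min m row.length) w = w := by
      intro ys
      induction ys with
      | nil => intro _; rfl
      | cons y ys ih =>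
        intro hys
        simp only [List.foldl_cons]
        rw [hys _ List.mem_cons_self, Nat.min_self]
        exact ih (fun r hr => hys _ (List.mem_cons_of_mem _ hr))
    exact aux xs (fun r hr => hall _ (List.mem_cons_of_mem _ hr))

theorem pvRot_eq {h w : Nat} {g : List (List Char)} (hh : 0 < h) (hg : pvRect h w g) :
    pvRotA g = pvRotB g := by
  obtain ⟨h1, h2⟩ := hg
  have hne : g ≠ [] := by intro hc; rw [hc] at h1; simp at h1; omega
  have hmin : pvMinLen g.reverse = w :=
    pvMinLen_const _ (by simpa using hne) (fun row hr => h2 _ (List.mem_reverse.mp hr))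
  simp only [pvRotA, pvRotB]
  rw [hmin, pvHead_len hh ⟨h1, h2⟩, h1]
  apply List.ext_getElem (by simp)
  intro i hi1 hi2
  have hiw : i < w := by simpa using hi1
  simp only [List.getElem_map, List.getElem_range]
  apply List.ext_getElem (by simp [h1])
  intro j hj1 hj2
  have hjh : j < h := by simpa using hj2
  simp only [List.getElem_map, List.getElem_range]
  have hrev : g.reverse[j]'(by simp [h1]; omega) = g[h - 1 - j]'(by omega) := by
    rw [List.getElem_reverse]
    congr 1
    omega
  rw [hrev]
  simp [pvGet2, List.getD_eq_getElem?_getD, List.getElem?_eq_getElem (show h - 1 - j < g.length from by omega)]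

theorem pvRect_rotB {h w : Nat} {g : List (List Char)} (hh : 0 < h) (hg : pvRect h w g) :
    pvRect w h (pvRotB g) := by
  constructor
  · simp only [pvRotB, List.length_map, List.length_range]
    exact pvHead_len hh hg
  · intro row hrow
    simp only [pvRotB] at hrow
    simp only [List.mem_map] at hrow
    obtain ⟨i, _, hrw⟩ := hrow
    rw [← hrw]
    simp [hg.1]

theorem pvSpin_eq {h w : Nat} {g : List (List Char)} (hh : 0 < h) (hw : 0 < w)
    (hg : pvRect h w g) : pvSpinA g = pvSpinB g ∧ pvRect h w (pvSpinB g) := by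
  have step : ∀ (h' w' : Nat) (g' : List (List Char)), 0 < h' → pvRect h' w' g' →
      pvRotA (pvTiltA g') = pvRotB (pvTiltB g') ∧ pvRect w' h' (pvRotB (pvTiltB g')) := by
    intro h' w' g' hh' hg'
    have ht := pvTilt_eq hg'
    have hrt := pvRect_tiltB hg'
    exact ⟨by rw [ht, pvRot_eq hh' hrt], pvRect_rotB hh' hrt⟩
  have e1 := step h w g hh hg
  have e2 := step w h _ hw e1.2
  have e3 := step h w _ hh e2.2
  have e4 := step w h _ hw e3.2
  have hA : pvSpinA g =
      pvRotA (pvTiltA (pvRotA (pvTiltA (pvRotA (pvTiltA (pvRotA (pvTiltA g))))))) := by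
    unfold pvSpinA
    rw [show List.range 4 = [0, 1, 2, 3] from by decide]
    simp only [List.foldl_cons, List.foldl_nil]
  have hBq : pvSpinB g =
      pvRotB (pvTiltB (pvRotB (pvTiltB (pvRotB (pvTiltB (pvRotB (pvTiltB g))))))) := by
    unfold pvSpinB
    rw [show List.range 4 = [0, 1, 2, 3] from by decide]
    simp only [List.foldl_cons, List.foldl_nil]
  constructor
  · rw [hA, hBq, e1.1, e2.1, e3.1, e4.1]
  · rw [hBq]
    exact e4.2

theorem pvFlatten_len {h w : Nat} {g : List (List Char)} (hg : pvRect h w g) :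
    g.flatten.length = h * w := by
  obtain ⟨h1, h2⟩ := hg
  subst h1
  simp only [List.length_flatten]
  induction g with
  | nil => simp
  | cons row g ih =>
    simp only [List.map_cons, List.sum_cons, List.length_cons]
    rw [h2 _ List.mem_cons_self, ih (fun r hr => h2 _ (List.mem_cons_of_mem _ hr))]
    ring

theorem pvChunks_cons {w : Nat} (hw : 0 < w) (l : List Char) (hl : w ≤ l.length) :
    pvChunks w l = l.take w :: pvChunks w (l.drop w) := by
  rw [pvChunks, dif_neg (by omega)]

theorem pvChunks_nil {w : Nat} (hw : 0 < w) : pvChunks w [] = [] := by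
  rw [pvChunks, dif_pos (by simp; omega)]

theorem pvChunks_length {w : Nat} (hw : 0 < w) :
    ∀ (n : Nat) (l : List Char), l.length = n * w → (pvChunks w l).length = n := by
  intro n
  induction n with
  | zero =>
    intro l hl
    have : l = [] := List.eq_nil_of_length_eq_zero (by omega)
    subst this
    rw [pvChunks_nil hw]
    rfl
  | succ n ih =>
    intro l hl
    rw [pvChunks_cons hw l (by nlinarith)]
    simp only [List.length_cons]
    rw [ih (l.drop w) (by rw [List.length_drop, hl, Nat.succ_mul, Nat.add_sub_cancel])]

theorem pvLoadB_sum (l : List Char) (h w : Nat) :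
    pvLoadB l h w = ((PySem.List.enumerate l 0).map
      (fun p => if p.2 = 'O' then ((h : Int) - p.1 / (w : Int)) else 0)).sum := by
  unfold pvLoadB
  rw [show (fun (acc : Int) (p : Int × Char) =>
        if p.2 = 'O' then acc + ((h : Int) - p.1 / (w : Int)) else acc) =
      (fun acc p => acc + (if p.2 = 'O' then ((h : Int) - p.1 / (w : Int)) else 0)) from by
    funext acc p
    split <;> simp]
  rw [PySem.List.foldl_add]
  simp

theorem pvLoadA_sum (fg : List (List Char)) :
    pvLoadA fg = ((PySem.List.enumerate fg 0).map
      (fun p => (p.2.map (fun ch =>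
        if ch = 'O' then ((fg.length : Int) - p.1) else 0)).sum)).sum := by
  unfold pvLoadA
  rw [show (fun (res : Int) (p : Int × List Char) => p.2.foldl
        (fun r2 ch => if ch = 'O' then r2 + ((fg.length : Int) - p.1) else r2) res) =
      (fun res p => res + (p.2.map (fun ch =>
        if ch = 'O' then ((fg.length : Int) - p.1) else 0)).sum) from by
    funext res p
    rw [show (fun (r2 : Int) (ch : Char) =>
          if ch = 'O' then r2 + ((fg.length : Int) - p.1) else r2) =
        (fun r2 ch => r2 + (if ch = 'O' then ((fg.length : Int) - p.1) else 0)) from by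
      funext r2 ch
      split <;> simp]
    rw [PySem.List.foldl_add]]
  rw [PySem.List.foldl_add]
  simp

theorem pvRowSum (w : Nat) (X s : Int) :
    ∀ (row : List Char) (t : Int),
    (∀ k : Nat, k < row.length → (t + k) / (w : Int) = s) →
    ((PySem.List.enumerate row t).map
        (fun p => if p.2 = 'O' then X - p.1 / (w : Int) else 0)).sum
      = (row.map (fun ch => if ch = 'O' then X - s else 0)).sum := by
  intro row
  induction row with
  | nil => intro t _; simp [PySem.List.enumerate_nil]
  | cons ch row ih =>
    intro t ht
    rw [PySem.List.enumerate_cons]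
    simp only [List.map_cons, List.sum_cons]
    rw [ih (t + 1) (fun k hk => by
      have hx := ht (k + 1) (by simpa using Nat.succ_lt_succ hk)
      push_cast at hx ⊢
      rw [show t + 1 + (k : Int) = t + ((k : Int) + 1) from by ring]
      exact hx)]
    have h0 := ht 0 (by simp)
    simp only [Nat.cast_zero, add_zero] at h0
    rw [h0]

theorem pvChunkSum {w : Nat} (hw : 0 < w) (X : Int) :
    ∀ (n : Nat) (l : List Char) (s : Nat), l.length = n * w →
    ((PySem.List.enumerate l ((s : Int) * w)).map
        (fun p => if p.2 = 'O' then X - p.1 / (w : Int) else 0)).sum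
      = ((PySem.List.enumerate (pvChunks w l) s).map
          (fun p => (p.2.map (fun ch => if ch = 'O' then X - p.1 else 0)).sum)).sum := by
  intro n
  induction n with
  | zero =>
    intro l s hl
    have : l = [] := List.eq_nil_of_length_eq_zero (by omega)
    subst this
    rw [pvChunks_nil hw]
    simp [PySem.List.enumerate_nil]
  | succ n ih =>
    intro l s hl
    have hwl : w ≤ l.length := by nlinarith
    rw [pvChunks_cons hw l hwl]
    conv_lhs => rw [show l = l.take w ++ l.drop w from (List.take_append_drop w l).symm]
    rw [PySem.List.enumerate_append, List.map_append, List.sum_append,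
        PySem.List.enumerate_cons]
    simp only [List.map_cons, List.sum_cons]
    have htlen : (l.take w).length = w := List.length_take_of_le hwl
    congr 1
    · rw [pvRowSum w X (s : Int) (l.take w) ((s : Int) * w) (fun k hk => by
        rw [htlen] at hk
        rw [show (s : Int) * w + k = k + (s : Int) * w from by ring,
            Int.add_mul_ediv_right _ _ (by omega : (w : Int) ≠ 0),
            Int.ediv_eq_zero_of_lt (by omega) (by omega)]
        omega)]
    · have hrest := ih (l.drop w) (s + 1)
        (by rw [List.length_drop, hl, Nat.succ_mul, Nat.add_sub_cancel])
      rw [htlen]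
      rw [show (s : Int) * w + (w : Int) = ((s + 1 : Nat) : Int) * w from by push_cast; ring]
      exact hrest

theorem pvLoad_eq {h w : Nat} (hw : 0 < w) (l : List Char) (hl : l.length = h * w) :
    pvLoadA (pvChunks w l) = pvLoadB l h w := by
  rw [pvLoadA_sum, pvLoadB_sum, pvChunks_length hw h l hl]
  have := pvChunkSum hw (h : Int) h l 0 hl
  simpa using this.symm

theorem pvSeen_insert (seen : PySem.Dict (List Char) Nat) (history : List (List Char))
    (state : List Char) (hsn : state ∉ history)
    (hseen : ∀ x, seen.get? x = PySem.List.index? history x) :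
    ∀ x, (seen.insert state history.length).get? x =
      PySem.List.index? (history ++ [state]) x := by
  intro x
  rw [PySem.Dict.get?_insert]
  by_cases hx : x = state
  · subst hx
    rw [if_pos rfl, PySem.List.index?_append_singleton_self _ _ hsn]
  · rw [if_neg hx, hseen x]
    by_cases hmem : x ∈ history
    · rw [PySem.List.index?_append_of_mem _ hmem]
    · rw [(PySem.List.index?_eq_none_iff _ _).mpr hmem,
          (PySem.List.index?_eq_none_iff _ _).mpr (by
            intro hc
            rcases List.mem_append.mp hc with hm | hm
            · exact hmem hm
            · simp at hm
              exact hx hm)]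

set_option maxHeartbeats 1000000 in
theorem pvLoop_eq {h w : Nat} (hh : 0 < h) (hw : 0 < w) :
    ∀ (fuel : Nat) (grid : List (List Char)) (grids : List (List Char))
      (seen : PySem.Dict (List Char) Nat) (history : List (List Char)),
      pvRect h w grid →
      grids = history ++ [grid.flatten] →
      grids.Nodup →
      (∀ x ∈ grids, x.length = h * w) →
      (∀ x, seen.get? x = PySem.List.index? history x) →
      pvLoopA fuel grid grids =
        pvLoopB fuel history.length grid grid.flatten seen history := by
  intro fuel
  induction fuel with
  | zero => intro grid grids seen history _ _ _ _ _; rfl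
  | succ fuel ih =>
    intro grid grids seen history hrect hgr hnd hlen hseen
    have hspin := pvSpin_eq hh hw hrect
    have hstate_mem : grid.flatten ∉ history := by
      have hnd2 := hnd
      rw [hgr] at hnd2
      have hx := (List.nodup_append.mp hnd2).2.2
      intro hc
      exact hx _ hc _ (by simp) rfl
    have hseen' := pvSeen_insert seen history grid.flatten hstate_mem hseen
    simp only [pvLoopA, pvLoopB]
    rw [hspin.1]
    rw [hseen' ((pvSpinB grid).flatten), ← hgr]
    cases hidx : PySem.List.index? grids ((pvSpinB grid).flatten) with
    | some idx =>
      dsimp only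
      obtain ⟨hk, _, _⟩ := PySem.List.getElem_of_index?_eq_some hidx
      have hLen : grids.length = history.length + 1 := by rw [hgr]; simp
      have htarget : (1000000000 - idx) % (grids.length - idx) + idx =
          idx + (1000000000 - idx) % (history.length + 1 - idx) := by
        rw [← hLen]
        exact Nat.add_comm _ _
      have htL : (1000000000 - idx) % (grids.length - idx) + idx < grids.length := by
        have := Nat.mod_lt (1000000000 - idx) (y := grids.length - idx) (by omega)
        omega
      rw [← htarget, List.getD_eq_getElem grids [] htL]
      have hx := hlen _ (List.getElem_mem htL)
      rw [pvHead_len hh hspin.2, hspin.2.1]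
      exact pvLoad_eq hw _ hx
    | none =>
      dsimp only
      have hnotmem : (pvSpinB grid).flatten ∉ grids :=
        (PySem.List.index?_eq_none_iff _ _).mp hidx
      have h3 : (grids ++ [(pvSpinB grid).flatten]).Nodup := by
        rw [List.nodup_append]
        exact ⟨hnd, List.nodup_singleton _, by
          intro a ha b hb
          rw [List.mem_singleton] at hb
          intro hcon
          exact hnotmem ((hcon.trans hb) ▸ ha)⟩
      have h4 : ∀ x ∈ grids ++ [(pvSpinB grid).flatten], x.length = h * w := by
        intro x hxm
        rcases List.mem_append.mp hxm with hm | hm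
        · exact hlen _ hm
        · rw [List.mem_singleton] at hm
          rw [hm]
          exact pvFlatten_len hspin.2
      have h5 : ∀ x, (seen.insert grid.flatten history.length).get? x =
          PySem.List.index? grids x := fun x => (hseen' x).trans (by rw [hgr])
      have hLen : grids.length = history.length + 1 := by rw [hgr]; simp
      have hrec := ih (pvSpinB grid) (grids ++ [(pvSpinB grid).flatten])
        (seen.insert grid.flatten history.length) grids hspin.2 rfl h3 h4 h5
      rw [show history.length + 1 = grids.length from hLen.symm]
      exact hrec

-- ===== VERDICT (by name: the statement is the Claim_ definition above) =====
theorem part2_spec : Claim_equal_part2 := by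
  intro s _ hpre
  unfold Spec_part2 part2 part2_alt
  obtain ⟨hne, hw0, hrect⟩ := hpre
  set g := (PySem.Str.splitlines s).map String.toList with hg
  have hh : 0 < g.length := List.length_pos_of_ne_nil hne
  have hw : 0 < (g.headD []).length := Nat.pos_of_ne_zero hw0
  have := pvLoop_eq (h := g.length) (w := (g.headD []).length) hh hw
    1000000000 g [g.flatten] PySem.Dict.empty []
    ⟨rfl, hrect⟩ (by simp) (by simp)
    (by intro x hx; simp at hx; subst hx; exact pvFlatten_len ⟨rfl, hrect⟩)
    (by intro x; simp [PySem.Dict.get?_empty, PySem.List.index?])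
  simpa using this
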